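-- pv_equiv track=rewrite | github.com/Pebaz/coding-problems | lambda/03-13-20.py | qux
-- ===== SOURCE A (Python) =====
-- def qux(group):
--     """
--     Time: O(N!)
--     Space: O(1)
--     Stragegy: Iterative
--     """
--
--     combine = {
--         (*'GB',) : 'R', (*'RB',) : 'G', (*'RG',) : 'B',
--         (*'BG',) : 'R', (*'BR',) : 'G', (*'GR',) : 'B'
--     }
--
--     for _ in range(len(group)):
--         combined = False
--         for i in range(len(group) - 1):
--             q1 = group[i]
--             q2 = group[i + 1]
--             if q1 != q2:
--                 group = [combine[q1, q2]] + group[i + 2:]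
--                 combined = True
--                 break
--         if not combined: break
--
--     return len(group)
-- ===== SOURCE B (Python) =====
-- THIRD = {('R','G'):'B', ('G','R'):'B', ('R','B'):'G', ('B','R'):'G', ('G','B'):'R', ('B','G'):'R'}
--
-- def qux(group):
--     """O(N) single pass: keep only the current head-run color and its length.
--
--     A repeatedly rescans from the front; but each merge replaces the whole
--     equal head run plus the next differing color by the single third color,
--     so the entire process is a left fold over the input with state
--     (current color, current run length)."""
--     cur, count = None, 0
--     for x in group:
--         if count == 0:
--             cur, count = x, 1
--         elif x == cur:
--             count += 1
--         else:
--             cur, count = THIRD[cur, x], 1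
--     return count
-- ===== Notes on version B (the rewrite author's own statement) =====
-- stated objective: simpler
-- what changed: Replaced the restart-scan-and-rebuild nested loops (which after every merge rebuild the list and rescan from the front) by a single left-to-right fold over the input tracking only the current head-run color and its length.
import Mathlib
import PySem

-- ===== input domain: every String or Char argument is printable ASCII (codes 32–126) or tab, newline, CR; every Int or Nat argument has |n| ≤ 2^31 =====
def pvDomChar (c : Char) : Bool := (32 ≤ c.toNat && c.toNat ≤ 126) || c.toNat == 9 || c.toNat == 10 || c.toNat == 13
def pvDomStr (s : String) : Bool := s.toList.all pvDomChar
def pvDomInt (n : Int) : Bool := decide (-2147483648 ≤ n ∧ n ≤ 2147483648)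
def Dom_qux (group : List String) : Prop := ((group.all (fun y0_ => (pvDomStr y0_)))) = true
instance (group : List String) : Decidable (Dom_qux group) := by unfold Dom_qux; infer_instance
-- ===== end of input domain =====

-- B replaces A's restart-scan-and-rebuild nested loops (which rebuild the list after every
-- merge) by one left fold tracking only the current head-run color and its length.

-- ===== PORT A =====
-- the literal dict `combine` of A (keys are the (q1, q2) pairs)
def pvCombine : PySem.Dict (String × String) String :=
  PySem.Dict.ofList [(("G","B"),"R"), (("R","B"),"G"), (("R","G"),"B"),
                     (("B","G"),"R"), (("B","R"),"G"), (("G","R"),"B")]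

-- combine[q1, q2]; a missing key is a KeyError in A, excluded by Pre_qux (default "" never claimed)
def pvCombGet (q1 q2 : String) : String := (pvCombine.get? (q1, q2)).getD ""

-- A's inner loop: scan i = 0,1,… for the first adjacent differing pair; on hit, A REBUILDS
-- the list as [combine[q1,q2]] + group[i+2:] (the scanned prefix group[:i], all equal, is dropped —
-- exactly what dropping it during the scan does here); no hit = no `combined` = break.
def quxScan : List String → Option (List String)
  | [] => none
  | [_] => none
  | q1 :: q2 :: rest =>
      if q1 ≠ q2 then some (pvCombGet q1 q2 :: rest) else quxScan (q2 :: rest)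
  termination_by l => l.length

-- A's outer loop: `for _ in range(len(group))` with `if not combined: break`
def quxLoop : Nat → List String → List String
  | 0, g => g
  | fuel + 1, g =>
      match quxScan g with
      | none => g
      | some g' => quxLoop fuel g'

def qux (group : List String) : Int := ((quxLoop group.length group).length : Int)

-- ===== PORT B =====
-- B's module-level dict THIRD; a missing key is a KeyError in B too, excluded by Pre_qux (default "" never claimed)
def pvThirdDict : PySem.Dict (String × String) String :=
  PySem.Dict.ofList [(("R","G"),"B"), (("G","R"),"B"), (("R","B"),"G"),
                     (("B","R"),"G"), (("G","B"),"R"), (("B","G"),"R")]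

-- THIRD[cur, x]
def pvThird (c x : String) : String := (pvThirdDict.get? (c, x)).getD ""

-- B's loop body on state (cur, count)
def pvStep (p : String × Int) (x : String) : String × Int :=
  if p.2 == 0 then (x, 1)
  else if x == p.1 then (p.1, p.2 + 1)
  else (pvThird p.1 x, 1)

def qux_alt (group : List String) : Int := (group.foldl pvStep ("", 0)).2

-- ===== PRECONDITION & SPEC =====
-- Pre_ excludes exactly the inputs on which A (and likewise B) raises KeyError: lists that are
-- neither all in {"R","G","B"} nor all-equal eventually put a pair outside the merge table.
def Pre_qux (group : List String) : Prop :=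
  (∀ s ∈ group, s = "R" ∨ s = "G" ∨ s = "B") ∨ (∀ s ∈ group, group.head? = some s)
instance (group : List String) : Decidable (Pre_qux group) := by unfold Pre_qux; infer_instance

def pvWitness_qux : List String := ["R", "G", "B", "B"]

def Spec_qux (group : List String) (out : Int) : Prop := out = qux_alt group
instance (group : List String) (out : Int) : Decidable (Spec_qux group out) := by unfold Spec_qux; infer_instance

-- ===== CLAIM (what is proved, stated in full; the proofs are below) =====
def Claim_equal_qux : Prop := ∀ (group : List String), Dom_qux group → Pre_qux group → Spec_qux group (qux group)

-- ===== LEMMAS AND PROOFS =====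

def pvRGB (s : String) : Prop := s = "R" ∨ s = "G" ∨ s = "B"

lemma comb_eq_third (c x : String) (hc : pvRGB c) (hx : pvRGB x) (hne : x ≠ c) :
    pvCombGet c x = pvThird c x ∧ pvRGB (pvThird c x) := by
  rcases hc with rfl | rfl | rfl <;> rcases hx with rfl | rfl | rfl <;>
    first
    | exact absurd rfl hne
    | exact ⟨by decide, by unfold pvRGB; decide⟩

lemma scan_replicate (m : Nat) (c : String) : quxScan (List.replicate m c) = none := by
  induction m with
  | zero => simp [quxScan]
  | succ n ih =>
    cases n with
    | zero => simp [quxScan]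
    | succ k =>
      rw [List.replicate_succ, List.replicate_succ]
      rw [quxScan]
      rw [← List.replicate_succ]
      simp [ih]

lemma scan_found (m : Nat) (c x : String) (tl : List String) (hne : x ≠ c) :
    quxScan (List.replicate (m + 1) c ++ x :: tl) = some (pvCombGet c x :: tl) := by
  induction m with
  | zero =>
    rw [List.replicate_one, List.cons_append, List.nil_append, quxScan]
    simp [Ne.symm hne]
  | succ k ih =>
    rw [List.replicate_succ, List.replicate_succ, List.cons_append, List.cons_append, quxScan]
    simp only [← List.cons_append, ← List.replicate_succ]
    simp [ih]

lemma step_eq_count (c : String) (m : Nat) :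
    pvStep (c, (m : Int) + 1) c = (c, (m : Int) + 1 + 1) := by
  simp [pvStep]

lemma step_ne_count (c x : String) (m : Nat) (hne : x ≠ c) :
    pvStep (c, (m : Int) + 1) x = (pvThird c x, 1) := by
  simp [pvStep, hne]
  omega

lemma loop_main (tl : List String) :
    ∀ (c : String) (m fuel : Nat),
      ((∀ y ∈ tl, y = c) ∨ (pvRGB c ∧ ∀ y ∈ tl, pvRGB y)) → tl.length ≤ fuel →
      ((quxLoop fuel (List.replicate (m + 1) c ++ tl)).length : Int) =
        (List.foldl pvStep (c, (m : Int) + 1) tl).2 := by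
  induction tl with
  | nil =>
    intro c m fuel _ _
    have hstop : quxLoop fuel (List.replicate (m + 1) c ++ []) = List.replicate (m + 1) c := by
      cases fuel with
      | zero => simp [quxLoop]
      | succ f => simp [quxLoop, scan_replicate]
    rw [hstop]
    simp
  | cons x tl ih =>
    intro c m fuel hH hfuel
    by_cases hx : x = c
    · subst hx
      have hlist : List.replicate (m + 1) x ++ x :: tl = List.replicate (m + 1 + 1) x ++ tl := by
        rw [List.replicate_succ' (n := m + 1)]
        simp
      rw [hlist, List.foldl_cons, step_eq_count]
      have hH' : (∀ y ∈ tl, y = x) ∨ (pvRGB x ∧ ∀ y ∈ tl, pvRGB y) := by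
        rcases hH with h | ⟨hc, h⟩
        · exact Or.inl fun y hy => h y (List.mem_cons_of_mem _ hy)
        · exact Or.inr ⟨hc, fun y hy => h y (List.mem_cons_of_mem _ hy)⟩
      have := ih x (m + 1) fuel hH' (by simp at hfuel ⊢; omega)
      simpa using this
    · cases fuel with
      | zero => simp at hfuel
      | succ f =>
        rcases hH with h | ⟨hc, h⟩
        · exact absurd (h x (List.mem_cons_self)) hx
        have hxr : pvRGB x := h x (List.mem_cons_self)
        obtain ⟨hcomb, hthird⟩ := comb_eq_third c x hc hxr hx
        have hscan := scan_found m c x tl hx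
        have hloop : quxLoop (f + 1) (List.replicate (m + 1) c ++ x :: tl)
            = quxLoop f (pvCombGet c x :: tl) := by
          simp [quxLoop, hscan]
        rw [hloop, hcomb, List.foldl_cons, step_ne_count c x m hx]
        have hH' : (∀ y ∈ tl, y = pvThird c x) ∨ (pvRGB (pvThird c x) ∧ ∀ y ∈ tl, pvRGB y) :=
          Or.inr ⟨hthird, fun y hy => h y (List.mem_cons_of_mem _ hy)⟩
        have := ih (pvThird c x) 0 f hH' (by simp at hfuel ⊢; omega)
        simpa using this

-- ===== VERDICT (by name: the statement is the Claim_ definition above) =====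
theorem qux_spec : Claim_equal_qux := by
  intro group _ hpre
  unfold Spec_qux
  cases group with
  | nil => rfl
  | cons g0 rest =>
    have hH : (∀ y ∈ rest, y = g0) ∨ (pvRGB g0 ∧ ∀ y ∈ rest, pvRGB y) := by
      rcases hpre with h | h
      · exact Or.inr ⟨h g0 List.mem_cons_self,
          fun y hy => h y (List.mem_cons_of_mem _ hy)⟩
      · refine Or.inl fun y hy => ?_
        have := h y (List.mem_cons_of_mem _ hy)
        simpa using this.symm
    have hmain := loop_main rest g0 0 (rest.length + 1) hH (by omega)
    have hlen : (g0 :: rest).length = rest.length + 1 := rfl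
    have hlist : List.replicate (0 + 1) g0 ++ rest = g0 :: rest := by simp
    rw [hlist] at hmain
    have hstart : pvStep ("", 0) g0 = (g0, (0 : Int) + 1) := by simp [pvStep]
    unfold qux qux_alt
    rw [hlen, List.foldl_cons, hstart]
    exact hmain
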